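-- pv_equiv track=rewrite | github.com/tarenergy/python | Widerstand.py | get_color_code
-- ===== SOURCE A (Python) =====
-- def get_color_code(value):
--     color_map = {
--         0: "schwarz", 1: "braun", 2: "rot", 3: "orange", 4: "gelb",
--         5: "grün", 6: "blau", 7: "violett", 8: "grau", 9: "weiß"
--     }
--
--     if value < 10 or value > 99_000_000:
--         return "Wert außerhalb des Bereichs für Standard-Widerstandsfarbcode."
--
--     digits = []
--     multiplier = 0
--
--     while value >= 100:
--         value //= 10
--         multiplier += 1
--
--     digits.append(value // 10)  # erste Ziffer
--     digits.append(value % 10)   # zweite Ziffer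
--
--     color_code = [color_map[digits[0]], color_map[digits[1]], color_map[multiplier]]
--
--     return " - ".join(color_code)
-- ===== SOURCE B (Python) =====
-- def get_color_code(value):
--     color_map = {
--         0: "schwarz", 1: "braun", 2: "rot", 3: "orange", 4: "gelb",
--         5: "grün", 6: "blau", 7: "violett", 8: "grau", 9: "weiß"
--     }
--
--     if value < 10 or value > 99_000_000:
--         return "Wert außerhalb des Bereichs für Standard-Widerstandsfarbcode."
--
--     s = str(value)
--     multiplier = len(s) - 2
--     return " - ".join([color_map[int(s[0])], color_map[int(s[1])], color_map[multiplier]])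
-- ===== Notes on version B (the rewrite author's own statement) =====
-- stated objective: idiomatic
-- what changed: Replaces A's iterative //10 digit-stripping loop (mutating value and counting) by a loop-free closed-form extraction from the decimal string: s = str(value), multiplier = len(s) - 2, significant digits int(s[0]) and int(s[1]).
import Mathlib
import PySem

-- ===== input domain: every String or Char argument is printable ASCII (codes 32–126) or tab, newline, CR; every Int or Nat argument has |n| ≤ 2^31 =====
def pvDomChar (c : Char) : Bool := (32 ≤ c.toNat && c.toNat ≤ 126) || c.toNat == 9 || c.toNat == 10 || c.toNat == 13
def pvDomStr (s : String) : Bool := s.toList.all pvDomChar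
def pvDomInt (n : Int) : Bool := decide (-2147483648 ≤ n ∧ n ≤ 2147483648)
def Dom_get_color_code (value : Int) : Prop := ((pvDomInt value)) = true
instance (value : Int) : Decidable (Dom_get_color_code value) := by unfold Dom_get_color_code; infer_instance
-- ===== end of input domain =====

-- B replaces A's iterative //10 digit-stripping loop by a single closed-form extraction
-- from the decimal string str(value): idiomatic, no loop.  Same return value everywhere.

-- the color_map literal both Pythons build
def pvColorMap : PySem.Dict Int String :=
  PySem.Dict.ofList [(0, "schwarz"), (1, "braun"), (2, "rot"), (3, "orange"), (4, "gelb"),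
                     (5, "grün"), (6, "blau"), (7, "violett"), (8, "grau"), (9, "weiß")]

-- ===== PORT A =====
-- the 'while value >= 100: value //= 10; multiplier += 1' loop
def pvStrip (v : Int) (m : Int) : Int × Int :=
  if h : 100 ≤ v then pvStrip (PySem.Int.floordiv v 10) (m + 1) else (v, m)
termination_by v.toNat
decreasing_by
  rw [PySem.Int.floordiv_eq_ediv_of_pos (by norm_num : (0:Int) < 10)]
  omega

def get_color_code (value : Int) : String :=
  let color_map := pvColorMap
  if value < 10 ∨ 99000000 < value then
    "Wert außerhalb des Bereichs für Standard-Widerstandsfarbcode."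
  else
    let p := pvStrip value 0
    let multiplier := p.2
    -- digits.append(value // 10); digits.append(value % 10)
    let digits : List Int := [PySem.Int.floordiv p.1 10, PySem.Int.mod p.1 10]
    -- color_map[k] never misses here (keys 0‥9 present); .getD "" is the total lookup
    let color_code := [(color_map.get? (PySem.List.pyGetD digits 0 0)).getD "",
                       (color_map.get? (PySem.List.pyGetD digits 1 0)).getD "",
                       (color_map.get? multiplier).getD ""]
    PySem.Str.join " - " color_code

-- ===== PORT B =====
def get_color_code_alt (value : Int) : String :=
  let color_map := pvColorMap
  if value < 10 ∨ 99000000 < value then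
    "Wert außerhalb des Bereichs für Standard-Widerstandsfarbcode."
  else
    let s := PySem.Int.toStr value
    let multiplier := PySem.Str.len s - 2
    -- int(s[0]) / int(s[1]): the index and the parse never fail for 10 ≤ value
    let d0 := ((PySem.Str.pyGet? s 0).bind (fun c => PySem.Int.ofStr? (String.ofList [c]))).getD 0
    let d1 := ((PySem.Str.pyGet? s 1).bind (fun c => PySem.Int.ofStr? (String.ofList [c]))).getD 0
    PySem.Str.join " - " [(color_map.get? d0).getD "", (color_map.get? d1).getD "",
                          (color_map.get? multiplier).getD ""]

-- ===== PRECONDITION & SPEC =====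
def Spec_get_color_code (value : Int) (out : String) : Prop := out = get_color_code_alt value
instance (value : Int) (out : String) : Decidable (Spec_get_color_code value out) := by unfold Spec_get_color_code; infer_instance

-- ===== CLAIM (what is proved, stated in full; the proofs are below) =====
def Claim_equal_get_color_code : Prop := ∀ (value : Int), Dom_get_color_code value → Spec_get_color_code value (get_color_code value)

-- ===== LEMMAS AND PROOFS =====

-- decimal digit characters of a Nat, with the clean recursion (Nat.toDigits fuel removed)
def pvDigs (n : Nat) : List Char :=
  if n < 10 then [Nat.digitChar n]
  else pvDigs (n / 10) ++ [Nat.digitChar (n % 10)]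
decreasing_by exact Nat.div_lt_self (by omega) (by omega)

lemma pv_toDigitsCore (f : Nat) : ∀ (n : Nat) (acc : List Char), 0 < f → n < 10 ^ f →
    Nat.toDigitsCore 10 f n acc = pvDigs n ++ acc := by
  induction f with
  | zero => intro n acc h; omega
  | succ f ih =>
    intro n acc _ hn
    by_cases h10 : n < 10
    · have hd : n / 10 = 0 := Nat.div_eq_of_lt h10
      simp [Nat.toDigitsCore, hd, pvDigs, h10, Nat.mod_eq_of_lt h10]
    · have hd : n / 10 ≠ 0 := by omega
      have hf : 0 < f := by
        by_contra h
        have : f = 0 := by omega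
        subst this; simp at hn; omega
      have hlt : n / 10 < 10 ^ f := by
        have hn' : n < 10 ^ f * 10 := by rw [pow_succ] at hn; exact hn
        omega
      rw [Nat.toDigitsCore]
      simp only [hd, if_false]
      rw [ih (n / 10) _ hf hlt]
      conv_rhs => rw [pvDigs]
      simp [h10]

lemma pv_toChars (n : Nat) : PySem.Int.toChars (n : Int) = pvDigs n := by
  have h1 : ¬ ((n : Int) < 0) := by omega
  have h2 : (n : Int).toNat = n := by omega
  rw [PySem.Int.toChars]
  simp only [h1, if_false, h2]
  rw [Nat.toDigits]
  rw [pv_toDigitsCore (n + 1) n [] (by omega)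
    (lt_of_lt_of_le (Nat.lt_pow_self (by omega)) (Nat.pow_le_pow_right (by omega) (by omega)))]
  exact List.append_nil _

-- A's loop viewed on Nat
def pvNatStrip (n : Nat) : Nat × Nat :=
  if n < 100 then (n, 0)
  else let p := pvNatStrip (n / 10); (p.1, p.2 + 1)
decreasing_by exact Nat.div_lt_self (by omega) (by omega)

lemma pv_strip_eq (n : Nat) : ∀ (m : Int),
    pvStrip (n : Int) m = (((pvNatStrip n).1 : Int), m + ((pvNatStrip n).2 : Int)) := by
  induction n using pvNatStrip.induct with
  | case1 n h =>
    intro m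
    rw [pvStrip, pvNatStrip]
    simp only [h, if_true]
    have : ¬ (100 ≤ (n : Int)) := by omega
    simp [this]
  | case2 n h ih =>
    intro m
    rw [pvStrip, pvNatStrip]
    have h100 : (100 : Int) ≤ (n : Int) := by omega
    simp only [h100, dif_pos, h, if_false]
    have hfd : PySem.Int.floordiv (n : Int) 10 = ((n / 10 : Nat) : Int) := by
      exact_mod_cast PySem.Int.floordiv_natCast n 10
    rw [hfd, ih (m + 1)]
    have : (m + 1) + ((pvNatStrip (n / 10)).2 : Int) = m + (((pvNatStrip (n / 10)).2 : Nat) + 1 : Nat) := by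
      push_cast; ring
    rw [this]

lemma pv_digs_strip (n : Nat) (hn : 10 ≤ n) :
    ∃ t : List Char, pvDigs n = pvDigs (pvNatStrip n).1 ++ t ∧ t.length = (pvNatStrip n).2 ∧
      10 ≤ (pvNatStrip n).1 ∧ (pvNatStrip n).1 < 100 := by
  induction n using pvNatStrip.induct with
  | case1 n h =>
    rw [pvNatStrip]; simp only [if_pos h]
    exact ⟨[], (List.append_nil _).symm, rfl, hn, h⟩
  | case2 n h ih =>
    obtain ⟨t, ht, hlen, hlo, hhi⟩ := ih (by omega)
    rw [pvNatStrip]; simp only [h, if_false]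
    refine ⟨t ++ [Nat.digitChar (n % 10)], ?_, by simp [hlen], hlo, hhi⟩
    rw [pvDigs]
    rw [if_neg (show ¬ n < 10 by omega), ht, List.append_assoc]

lemma pv_digs_two (v : Nat) (h1 : 10 ≤ v) (h2 : v < 100) :
    pvDigs v = [Nat.digitChar (v / 10), Nat.digitChar (v % 10)] := by
  rw [pvDigs]
  have hv : ¬ v < 10 := by omega
  have : v / 10 < 10 := by omega
  rw [pvDigs]
  simp [hv, this]

lemma pv_parse_digit (d : Nat) (h : d < 10) :
    PySem.Int.ofStr? (String.ofList [Nat.digitChar d]) = some (d : Int) := by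
  interval_cases d <;> decide

-- ===== VERDICT (by name: the statement is the Claim_ definition above) =====
theorem get_color_code_spec : Claim_equal_get_color_code := by
  intro value _
  unfold Spec_get_color_code
  by_cases hg : value < 10 ∨ 99000000 < value
  · simp [get_color_code, get_color_code_alt, hg]
  · have h10 : 10 ≤ value := by omega
    have h99 : value ≤ 99000000 := by omega
    set n := value.toNat with hn
    have hv : value = (n : Int) := by omega
    have hn10 : 10 ≤ n := by omega
    obtain ⟨t, ht, hlen, hlo, hhi⟩ := pv_digs_strip n hn10
    have hguard : ¬ (value < 10 ∨ 99000000 < value) := by omega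
    rw [get_color_code, get_color_code_alt]
    simp only [hguard, if_false]
    rw [hv, pv_strip_eq n 0]
    have hs : (PySem.Int.toStr (n : Int)).toList = pvDigs n := by
      rw [PySem.Int.toList_toStr, pv_toChars]
    rw [pv_digs_two _ hlo hhi] at ht
    -- the three keys coincide
    have hd0 : PySem.Int.floordiv ((pvNatStrip n).1 : Int) 10 = (((pvNatStrip n).1 / 10 : Nat) : Int) :=
      PySem.Int.floordiv_natCast _ _
    have hd1 : PySem.Int.mod ((pvNatStrip n).1 : Int) 10 = (((pvNatStrip n).1 % 10 : Nat) : Int) :=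
      PySem.Int.mod_natCast _ _
    have hget0 : PySem.Str.pyGet? (PySem.Int.toStr (n : Int)) 0 =
        some (Nat.digitChar ((pvNatStrip n).1 / 10)) := by
      rw [PySem.Str.pyGet?_eq, hs, ht, PySem.Chars.pyGet?]
      simp [PySem.List.pyGet?_zero]
    have hget1 : PySem.Str.pyGet? (PySem.Int.toStr (n : Int)) 1 =
        some (Nat.digitChar ((pvNatStrip n).1 % 10)) := by
      rw [PySem.Str.pyGet?_eq, hs, ht, PySem.Chars.pyGet?]
      rw [show (1 : Int) = ((1 : Nat) : Int) by norm_num, PySem.List.pyGet?_natCast]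
      simp
    have hlenS : PySem.Str.len (PySem.Int.toStr (n : Int)) = ((pvNatStrip n).2 : Int) + 2 := by
      rw [PySem.Str.len_eq, hs, ht]
      simp only [List.length_append, List.length_cons, List.length_nil, hlen]
      omega
    simp only [hget0, hget1, hlenS, Option.bind_some,
      pv_parse_digit _ (by omega : (pvNatStrip n).1 / 10 < 10),
      pv_parse_digit _ (Nat.mod_lt _ (by omega)),
      Option.getD_some, hd0, hd1]
    have hmid : ∀ (a b : Int), PySem.List.pyGetD [a, b] 1 0 = b := by
      intro a b
      simp [PySem.List.pyGetD, PySem.List.pyGet?, PySem.List.pyIdx?]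
    rw [hmid]
    norm_num
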